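-- pv_equiv track=rewrite | github.com/tianap/pepper | modules/python/CandidateFinder.py | group_adjacent_mismatches
-- ===== SOURCE A (Python) =====
-- def group_adjacent_mismatches(mismatches):
--     all_groups = []
--     current_group = []
--     for mismatch in mismatches:
--         if len(current_group) == 0:
--             current_group.append(mismatch)
--         elif abs(current_group[-1][0] - mismatch[0]) <= 1:
--             current_group.append(mismatch)
--         else:
--             all_groups.append(current_group)
--             current_group = [mismatch]
--     all_groups.append(current_group)
--
--     return all_groups
-- ===== SOURCE B (Python) =====
-- def group_adjacent_mismatches(mismatches):
--     groups = []
--     start = 0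
--     for i in range(1, len(mismatches)):
--         if abs(mismatches[i][0] - mismatches[i - 1][0]) > 1:
--             groups.append(mismatches[start:i])
--             start = i
--     groups.append(mismatches[start:])
--     return groups
-- ===== Notes on version B (the rewrite author's own statement) =====
-- stated objective: alternative
-- what changed: B finds split boundaries by comparing adjacent positions in the original list and emits each run as a slice, instead of A's incremental building of a mutable current_group element by element.
import Mathlib
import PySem

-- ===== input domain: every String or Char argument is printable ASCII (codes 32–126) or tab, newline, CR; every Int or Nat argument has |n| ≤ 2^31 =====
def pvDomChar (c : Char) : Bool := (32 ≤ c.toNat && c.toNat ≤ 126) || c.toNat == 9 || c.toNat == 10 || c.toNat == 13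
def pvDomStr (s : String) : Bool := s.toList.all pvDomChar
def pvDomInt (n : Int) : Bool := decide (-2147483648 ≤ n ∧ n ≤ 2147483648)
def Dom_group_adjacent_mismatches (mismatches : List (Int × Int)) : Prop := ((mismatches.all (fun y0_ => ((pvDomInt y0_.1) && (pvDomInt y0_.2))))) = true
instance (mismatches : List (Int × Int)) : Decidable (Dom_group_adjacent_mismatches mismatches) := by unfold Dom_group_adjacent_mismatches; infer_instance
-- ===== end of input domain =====

-- B groups by finding split boundaries between adjacent positions and slicing, instead of A's incremental current_group accumulator (alternative decomposition; return values proved equal).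


-- ===== PORT A =====
-- state = (all_groups, current_group); current_group[-1] is read with getLastD, exact
-- because that branch runs only when current_group is nonempty.
def pvStepA (st : List (List (Int × Int)) × List (Int × Int)) (m : Int × Int) :
    List (List (Int × Int)) × List (Int × Int) :=
  if st.2.length = 0 then (st.1, st.2 ++ [m])
  else if ((st.2.getLastD (0, 0)).1 - m.1).natAbs ≤ 1 then (st.1, st.2 ++ [m])
  else (st.1 ++ [st.2], [m])

def group_adjacent_mismatches (mismatches : List (Int × Int)) : List (List (Int × Int)) :=
  let r := mismatches.foldl pvStepA ([], [])
  r.1 ++ [r.2]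

-- ===== PORT B =====
-- state = (groups, start); mismatches[i] with 0 ≤ i < len is read with getD, exact there;
-- the slice mismatches[start:i] with 0 ≤ start ≤ i is (drop start).take (i - start), exact there.
def pvStepB (ms : List (Int × Int)) (st : List (List (Int × Int)) × Nat) (i : Nat) :
    List (List (Int × Int)) × Nat :=
  if 1 < ((ms.getD i (0, 0)).1 - (ms.getD (i - 1) (0, 0)).1).natAbs then
    (st.1 ++ [(ms.drop st.2).take (i - st.2)], i)
  else st

def group_adjacent_mismatches_alt (mismatches : List (Int × Int)) : List (List (Int × Int)) :=
  let r := (List.range' 1 (mismatches.length - 1)).foldl (pvStepB mismatches) ([], 0)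
  r.1 ++ [mismatches.drop r.2]

-- ===== PRECONDITION & SPEC =====
def Spec_group_adjacent_mismatches (mismatches : List (Int × Int)) (out : List (List (Int × Int))) : Prop := out = group_adjacent_mismatches_alt mismatches
instance (mismatches : List (Int × Int)) (out : List (List (Int × Int))) : Decidable (Spec_group_adjacent_mismatches mismatches out) := by unfold Spec_group_adjacent_mismatches; infer_instance

-- ===== CLAIM (what is proved, stated in full; the proofs are below) =====
def Claim_equal_group_adjacent_mismatches : Prop := ∀ (mismatches : List (Int × Int)), Dom_group_adjacent_mismatches mismatches → Spec_group_adjacent_mismatches mismatches (group_adjacent_mismatches mismatches)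

-- ===== LEMMAS AND PROOFS =====

-- Loop invariant: after the first k elements (1 ≤ k ≤ n), A's state is B's groups so far
-- together with the slice mismatches[start:k] as the current group, and start < k.
theorem pv_inv (ms : List (Int × Int)) (k : Nat) (h1 : 1 ≤ k) (h2 : k ≤ ms.length) :
    ((List.range' 1 (k - 1)).foldl (pvStepB ms) ([], 0)).2 < k ∧
    (ms.take k).foldl pvStepA ([], []) =
      (((List.range' 1 (k - 1)).foldl (pvStepB ms) ([], 0)).1,
       (ms.drop ((List.range' 1 (k - 1)).foldl (pvStepB ms) ([], 0)).2).take
         (k - ((List.range' 1 (k - 1)).foldl (pvStepB ms) ([], 0)).2)) := by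
  induction k with
  | zero => omega
  | succ k ih =>
    rcases Nat.eq_or_lt_of_le h1 with h | h
    · -- k+1 = 1 : base case
      have hk0 : k = 0 := by omega
      subst hk0
      obtain ⟨m, tl, rfl⟩ : ∃ m tl, ms = m :: tl := by
        cases ms with
        | nil => simp at h2
        | cons a l => exact ⟨a, l, rfl⟩
      simp [pvStepA]
    · -- inductive step, 1 ≤ k
      have hk1 : 1 ≤ k := by omega
      have hk2 : k ≤ ms.length := by omega
      obtain ⟨hlt, heq⟩ := ih hk1 hk2
      set r := (List.range' 1 (k - 1)).foldl (pvStepB ms) ([], 0) with hr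
      have hrange : List.range' 1 (k + 1 - 1) = List.range' 1 (k - 1) ++ [k] := by
        have hk : k + 1 - 1 = (k - 1) + 1 := by omega
        rw [hk, List.range'_concat]
        have h1k : 1 + 1 * (k - 1) = k := by omega
        rw [h1k]
      have hklt : k < ms.length := by omega
      have hk1lt : k - 1 < ms.length := by omega
      have hgetk : ms[k] = ms.getD k (0, 0) := by
        simp [List.getD, List.getElem?_eq_getElem hklt]
      have hdropk : ms.drop k = ms.getD k (0, 0) :: ms.drop (k + 1) := by
        rw [List.drop_eq_getElem_cons hklt, hgetk]
      -- element ms[k]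
      have htake : ms.take (k + 1) = ms.take k ++ [ms.getD k (0, 0)] := by
        rw [List.take_add_one]
        congr 1
        simp [List.getElem?_eq_getElem hklt]
      -- the current group is nonempty and its last element is ms[k-1]
      have hcglen : ((ms.drop r.2).take (k - r.2)).length = k - r.2 := by
        simp [List.length_take, List.length_drop]; omega
      have hcgne : ((ms.drop r.2).take (k - r.2)).length ≠ 0 := by omega
      have hlast : ((ms.drop r.2).take (k - r.2)).getLastD (0, 0) = ms.getD (k - 1) (0, 0) := by
        have hgl : ((ms.drop r.2).take (k - r.2)).getLast? = ms[k - 1]? := by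
          rw [List.getLast?_eq_getElem?, hcglen,
            List.getElem?_take_of_lt (show k - r.2 - 1 < k - r.2 by omega), List.getElem?_drop]
          have hre : r.2 + (k - r.2 - 1) = k - 1 := by omega
          rw [hre]
        rw [List.getLastD_eq_getLast?, hgl]
        simp [List.getD]
      rw [hrange, List.foldl_append, htake, List.foldl_append, heq, ← hr]
      simp only [List.foldl_cons, List.foldl_nil, pvStepA, pvStepB, hlast]
      by_cases hc : 1 < ((ms.getD k (0, 0)).1 - (ms.getD (k - 1) (0, 0)).1).natAbs
      · -- split: new group starts at k
        have hc' : ¬ ((ms.getD (k - 1) (0, 0)).1 - (ms.getD k (0, 0)).1).natAbs ≤ 1 := by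
          omega
        simp only [if_pos hc, if_neg hc', if_neg hcgne]
        refine ⟨by omega, ?_⟩
        rw [hdropk]
        simp [List.getD]
      · have hc' : ((ms.getD (k - 1) (0, 0)).1 - (ms.getD k (0, 0)).1).natAbs ≤ 1 := by
          omega
        simp only [if_neg hc, if_neg hcgne, if_pos hc', Prod.mk.injEq]
        refine ⟨by omega, ?_, ?_⟩
        · trivial
        -- extend the current slice by one element
        · have hsum : k + 1 - r.2 = (k - r.2) + 1 := by omega
          rw [hsum, List.take_add]
          congr 1
          rw [List.drop_drop]
          have hre : r.2 + (k - r.2) = k := by omega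
          rw [hre, hdropk]
          simp

-- ===== VERDICT (by name: the statement is the Claim_ definition above) =====
theorem group_adjacent_mismatches_spec : Claim_equal_group_adjacent_mismatches := by
  intro ms _
  unfold Spec_group_adjacent_mismatches group_adjacent_mismatches group_adjacent_mismatches_alt
  cases hms : ms with
  | nil => simp
  | cons a tl =>
    rw [← hms]
    have hlen : 1 ≤ ms.length := by rw [hms]; simp
    obtain ⟨hlt, heq⟩ := pv_inv ms ms.length hlen le_rfl
    rw [List.take_length] at heq
    simp only [heq]
    congr 1
    rw [List.take_of_length_le]
    simp [List.length_drop]
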